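-- pv_equiv track=rewrite | github.com/liuguangxi/defi_turing | Codes/dt61.py | has_no_isolated_digits
-- ===== SOURCE A (Python) =====
-- def has_no_isolated_digits(n):
--     s = str(n)
--     if len(s) == 1: return False
--     if s[0] != s[1]: return False
--     if s[-1] != s[-2]: return False
--     for i in range(1, len(s) - 1):
--         if s[i] != s[i-1] and s[i] != s[i+1]:
--             return False
--     return True
-- ===== SOURCE B (Python) =====
-- def has_no_isolated_digits(n):
--     # Run-length view: True iff every maximal run of equal characters in str(n)
--     # has length at least 2.
--     def runs_ok(s):
--         if not s:
--             return True
--         k = 1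
--         while k < len(s) and s[k] == s[0]:
--             k += 1
--         return k >= 2 and runs_ok(s[k:])
--     return runs_ok(str(n))
-- ===== Notes on version B (the rewrite author's own statement) =====
-- stated objective: simpler
-- what changed: Replaces A's per-index neighbor comparisons with three endpoint guards by a single recursive run-length scan: split str(n) into maximal runs of equal characters and require every run to have length >= 2.
import Mathlib
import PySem

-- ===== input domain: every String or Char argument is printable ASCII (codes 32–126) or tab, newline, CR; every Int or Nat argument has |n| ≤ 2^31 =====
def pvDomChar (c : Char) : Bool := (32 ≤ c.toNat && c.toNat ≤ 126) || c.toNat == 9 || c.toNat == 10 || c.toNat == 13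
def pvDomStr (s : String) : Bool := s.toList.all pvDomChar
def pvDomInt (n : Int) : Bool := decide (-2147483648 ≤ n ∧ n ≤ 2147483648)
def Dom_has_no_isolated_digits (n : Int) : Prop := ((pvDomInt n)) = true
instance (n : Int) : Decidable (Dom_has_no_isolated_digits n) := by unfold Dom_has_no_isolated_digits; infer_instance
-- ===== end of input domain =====

-- B replaces A's per-index neighbor checks and endpoint guards by a recursive
-- run-length scan (every maximal run of equal chars must have length >= 2); same cost, simpler.

-- ===== PORT A =====
-- str(n) is nonempty, so after the len == 1 guard every index used below is in
-- range and pyGetD's default ' ' is dead code.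
def pvACheck (s : List Char) : Bool :=
  if s.length == 1 then false
  else if !(PySem.List.pyGetD s 0 ' ' == PySem.List.pyGetD s 1 ' ') then false
  else if !(PySem.List.pyGetD s (-1) ' ' == PySem.List.pyGetD s (-2) ' ') then false
  else (PySem.List.pyRange 1 ((s.length : Int) - 1) 1).all (fun i =>
    !((PySem.List.pyGetD s i ' ' != PySem.List.pyGetD s (i - 1) ' ') &&
      (PySem.List.pyGetD s i ' ' != PySem.List.pyGetD s (i + 1) ' ')))

def has_no_isolated_digits (n : Int) : Bool :=
  pvACheck (PySem.Int.toChars n)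

-- ===== PORT B =====
-- runs_ok from Source B: k = length of the first maximal run; require k >= 2
-- and recurse on s[k:].
def pvRunsOk (s : List Char) : Bool :=
  match s with
  | [] => true
  | c :: rest =>
      let k := 1 + (rest.takeWhile (fun d => d == c)).length
      decide (2 ≤ k) && pvRunsOk ((c :: rest).drop k)
termination_by s.length
decreasing_by
  simp only [List.length_drop, List.length_cons]
  have := (List.takeWhile_prefix (l := rest) (fun d => d == c)).length_le
  omega

def has_no_isolated_digits_alt (n : Int) : Bool :=
  pvRunsOk (PySem.Int.toChars n)

-- ===== PRECONDITION & SPEC =====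
def Spec_has_no_isolated_digits (n : Int) (out : Bool) : Prop := out = has_no_isolated_digits_alt n
instance (n : Int) (out : Bool) : Decidable (Spec_has_no_isolated_digits n out) := by unfold Spec_has_no_isolated_digits; infer_instance

-- ===== CLAIM (what is proved, stated in full; the proofs are below) =====
def Claim_equal_has_no_isolated_digits : Prop := ∀ (n : Int), Dom_has_no_isolated_digits n → Spec_has_no_isolated_digits n (has_no_isolated_digits n)

-- ===== LEMMAS AND PROOFS =====

-- ===== VERDICT (by name: the statement is the Claim_ definition above) =====
-- "no isolated position": every character equals a neighbor
def Good (s : List Char) : Prop :=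
  ∀ i < s.length,
    (0 < i ∧ s.getD i ' ' = s.getD (i - 1) ' ') ∨
    (i + 1 < s.length ∧ s.getD i ' ' = s.getD (i + 1) ' ')

lemma aCheck_of_two (s : List Char) (hL : 2 ≤ s.length) : pvACheck s = true ↔ Good s := by
  unfold pvACheck
  have h1 : (s.length == 1) = false := by simp; omega
  rw [h1, if_neg (by simp)]
  rw [PySem.List.pyGetD_ofNat' s 0 ' ', PySem.List.pyGetD_ofNat' s 1 ' ']
  rw [PySem.List.pyGetD_neg_ofNat s 1 ' ' (by omega) (by omega),
      PySem.List.pyGetD_neg_ofNat s 2 ' ' (by omega) (by omega)]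
  rw [← List.getD_eq_getElem s ' ' (n := s.length - 1) (by omega),
      ← List.getD_eq_getElem s ' ' (n := s.length - 2) (by omega)]
  by_cases hab : s.getD 0 ' ' = s.getD 1 ' '
  · rw [if_neg (show ¬ _ from by
      simp only [Bool.not_eq_eq_eq_not, Bool.not_true, beq_eq_false_iff_ne]
      exact fun h => h hab)]
    by_cases hlast : s.getD (s.length - 1) ' ' = s.getD (s.length - 2) ' '
    · rw [if_neg (show ¬ _ from by
        simp only [Bool.not_eq_eq_eq_not, Bool.not_true, beq_eq_false_iff_ne]
        exact fun h => h hlast)]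
      rw [List.all_eq_true]
      constructor
      · intro hall i hi
        by_cases hi0 : i = 0
        · subst hi0
          exact Or.inr ⟨by omega, hab⟩
        · by_cases hilast : i = s.length - 1
          · refine Or.inl ⟨by omega, ?_⟩
            have e : i - 1 = s.length - 2 := by omega
            rw [e, hilast]
            exact hlast
          · have hmem : (i : Int) ∈ PySem.List.pyRange 1 (↑s.length - 1) 1 := by
              rw [PySem.List.mem_pyRange_one]
              refine ⟨by omega, by omega⟩
            have hx := hall _ hmem
            have e1 : ((i : Int) - 1) = ((i - 1 : Nat) : Int) := by omega
            have e2 : ((i : Int) + 1) = ((i + 1 : Nat) : Int) := by omega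
            rw [e1, e2] at hx
            simp only [PySem.List.pyGetD_natCast, Bool.not_and, Bool.or_eq_true,
              Bool.not_eq_eq_eq_not, Bool.not_true, bne_eq_false_iff_eq] at hx
            rcases hx with h | h
            · exact Or.inl ⟨by omega, h⟩
            · exact Or.inr ⟨by omega, h⟩
      · intro hG x hx
        rw [PySem.List.mem_pyRange_one] at hx
        obtain ⟨hx1, hx2⟩ := hx
        have hxe : x = ((x.toNat : Nat) : Int) := by omega
        have e1 : (((x.toNat : Nat) : Int) - 1) = ((x.toNat - 1 : Nat) : Int) := by omega
        have e2 : (((x.toNat : Nat) : Int) + 1) = ((x.toNat + 1 : Nat) : Int) := by omega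
        rw [hxe, e1, e2]
        simp only [PySem.List.pyGetD_natCast, Bool.not_and, Bool.or_eq_true,
          Bool.not_eq_eq_eq_not, Bool.not_true, bne_eq_false_iff_eq]
        rcases hG x.toNat (by omega) with ⟨_, heq⟩ | ⟨_, heq⟩
        · exact Or.inl heq
        · exact Or.inr heq
    · rw [if_pos (show _ from by
        simp only [Bool.not_eq_eq_eq_not, Bool.not_true, beq_eq_false_iff_ne]
        exact hlast)]
      constructor
      · intro h; exact absurd h (by simp)
      · intro hG
        exfalso
        rcases hG (s.length - 1) (by omega) with ⟨hpos, heq⟩ | ⟨hlt, _⟩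
        · have e : s.length - 1 - 1 = s.length - 2 := by omega
          rw [e] at heq
          exact hlast heq
        · omega
  · rw [if_pos (show _ from by
      simp only [Bool.not_eq_eq_eq_not, Bool.not_true, beq_eq_false_iff_ne]
      exact hab)]
    constructor
    · intro h; exact absurd h (by simp)
    · intro hG
      exfalso
      rcases hG 0 (by omega) with ⟨hpos, _⟩ | ⟨hlt, heq⟩
      · omega
      · exact hab heq

lemma aCheck_iff_good (s : List Char) : pvACheck s = true ↔ Good s := by
  match s with
  | [] =>
    constructor
    · intro _ i hi; simp at hi
    · intro _; decide
  | [c] =>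
    constructor
    · intro h; simp [pvACheck] at h
    · intro h
      rcases h 0 (by simp) with ⟨h0, _⟩ | ⟨h1, _⟩
      · exact absurd h0 (by simp)
      · simp at h1
  | a :: b :: t => exact aCheck_of_two _ (by simp)

lemma dropWhile_head_ne {p : Char → Bool} : ∀ (l : List Char) (d : Char),
    (l.dropWhile p).head? = some d → p d = false := by
  intro l
  induction l with
  | nil => intro d h; simp at h
  | cons x xs ih =>
    intro d h
    rw [List.dropWhile_cons] at h
    split at h
    · exact ih d h
    · simp at h
      subst h
      simpa using ‹¬ p x = true›

lemma good_cons (c : Char) (t r : List Char) (ht : ∀ x ∈ t, x = c)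
    (hr : ∀ d, r.head? = some d → d ≠ c) :
    Good (c :: (t ++ r)) ↔ (t ≠ [] ∧ Good r) := by
  have hlen : (c :: (t ++ r)).length = t.length + 1 + r.length := by simp; omega
  have hlow : ∀ i ≤ t.length, (c :: (t ++ r)).getD i ' ' = c := by
    intro i hi
    match i with
    | 0 => rfl
    | j + 1 =>
      have hj : j < t.length := by omega
      rw [List.getD_cons_succ, List.getD_eq_getElem?_getD,
          List.getElem?_append_left hj]
      simp [List.getElem?_eq_getElem hj]
      exact ht _ (List.getElem_mem hj)
  have hhigh : ∀ j, (c :: (t ++ r)).getD (t.length + 1 + j) ' ' = r.getD j ' ' := by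
    intro j
    have h : (c :: (t ++ r)) = (c :: t) ++ r := by simp
    rw [h, List.getD_eq_getElem?_getD,
        List.getElem?_append_right (by simp only [List.length_cons]; omega),
        List.getD_eq_getElem?_getD]
    have e : t.length + 1 + j - (c :: t).length = j := by
      simp only [List.length_cons]
      omega
    rw [e]
  constructor
  · intro G
    have hne : t ≠ [] := by
      intro h0
      subst h0
      rcases G 0 (by simp) with ⟨hpos, _⟩ | ⟨hlt, heq⟩
      · exact absurd hpos (by simp)
      · cases r with
        | nil => simp at hlt
        | cons d r' =>
          have h0 := hlow 0 (by simp)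
          have h1 := hhigh 0
          simp only [List.length_nil, Nat.zero_add, Nat.add_zero] at h0 h1 heq
          rw [h0] at heq
          simp only [List.getD_cons_zero] at h1
          exact hr d rfl ((heq.trans h1).symm)
    refine ⟨hne, ?_⟩
    intro j hj
    rcases G (t.length + 1 + j) (by omega) with ⟨hpos, heq⟩ | ⟨hlt, heq⟩
    · match j with
      | 0 =>
        exfalso
        rw [hhigh 0] at heq
        have : t.length + 1 + 0 - 1 = t.length := by omega
        rw [this, hlow t.length (by omega)] at heq
        match r, hj with
        | d :: r', _ =>
          simp at heq
          exact hr d rfl heq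
      | k + 1 =>
        left
        refine ⟨by omega, ?_⟩
        rw [hhigh (k+1)] at heq
        have : t.length + 1 + (k + 1) - 1 = t.length + 1 + k := by omega
        rw [this, hhigh k] at heq
        simpa using heq
    · right
      refine ⟨by omega, ?_⟩
      rw [hhigh j] at heq
      have : t.length + 1 + j + 1 = t.length + 1 + (j + 1) := by omega
      rw [this, hhigh (j+1)] at heq
      exact heq
  · rintro ⟨hne, Gr⟩
    have hm : 1 ≤ t.length := by
      cases t with
      | nil => exact absurd rfl hne
      | cons x xs => simp
    intro i hi
    rcases Nat.lt_or_ge i (t.length + 1) with hcase | hcase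
    · match i with
      | 0 =>
        right
        refine ⟨by omega, ?_⟩
        rw [hlow 0 (by omega), hlow 1 (by omega)]
      | k + 1 =>
        left
        refine ⟨by omega, ?_⟩
        rw [hlow (k+1) (by omega)]
        have : k + 1 - 1 = k := by omega
        rw [this, hlow k (by omega)]
    · obtain ⟨j, rfl⟩ : ∃ j, i = t.length + 1 + j := ⟨i - (t.length + 1), by omega⟩
      have hj : j < r.length := by omega
      rcases Gr j hj with ⟨hpos, heq⟩ | ⟨hlt, heq⟩
      · left
        refine ⟨by omega, ?_⟩
        rw [hhigh j]
        have : t.length + 1 + j - 1 = t.length + 1 + (j - 1) := by omega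
        rw [this, hhigh (j-1)]
        exact heq
      · right
        refine ⟨by omega, ?_⟩
        rw [hhigh j]
        have : t.length + 1 + j + 1 = t.length + 1 + (j + 1) := by omega
        rw [this, hhigh (j+1)]
        exact heq

lemma runsOk_iff_good (s : List Char) : pvRunsOk s = true ↔ Good s := by
  induction s using pvRunsOk.induct with
  | case1 =>
    rw [pvRunsOk]
    constructor
    · intro _ i hi; simp at hi
    · intro _; rfl
  | case2 c rest k ih =>
    rw [pvRunsOk]
    set t := rest.takeWhile (fun d => d == c) with htdef
    have hsplit : t ++ rest.dropWhile (fun d => d == c) = rest :=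
      List.takeWhile_append_dropWhile
    have hdrop : (c :: rest).drop (1 + t.length) = rest.dropWhile (fun d => d == c) := by
      have h1 : 1 + t.length = t.length + 1 := by omega
      rw [h1, List.drop_succ_cons]
      conv_lhs => rw [← hsplit]
      exact List.drop_left
    have ht : ∀ x ∈ t, x = c := by
      intro x hx
      have := List.mem_takeWhile_imp hx
      simpa using this
    have hr : ∀ d, (rest.dropWhile (fun d => d == c)).head? = some d → d ≠ c := by
      intro d hd
      have := dropWhile_head_ne (rest) d hd
      simpa using this
    have hGoodEq : Good (c :: rest) ↔
        (t ≠ [] ∧ Good (rest.dropWhile (fun d => d == c))) := by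
      conv_lhs => rw [← hsplit]
      exact good_cons c t _ ht hr
    have hlen_iff : (2 ≤ 1 + t.length) ↔ t ≠ [] := by
      cases t with
      | nil => simp
      | cons a l => simp; omega
    rw [hdrop] at ih
    rw [hdrop, Bool.and_eq_true, decide_eq_true_iff, ih, hGoodEq, hlen_iff]

lemma check_eq (s : List Char) : pvACheck s = pvRunsOk s := by
  rw [Bool.eq_iff_iff, aCheck_iff_good, runsOk_iff_good]

theorem has_no_isolated_digits_spec : Claim_equal_has_no_isolated_digits := by
  intro n _
  unfold Spec_has_no_isolated_digits has_no_isolated_digits has_no_isolated_digits_alt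
  exact check_eq _
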